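-- pv_equiv track=rewrite | github.com/ll-ohan/petit-prince | indexer/src/indexer/pipeline/chunker.py | _char_bounds_from_offsets
-- ===== SOURCE A (Python) =====
-- from typing import Any
--
-- def _char_bounds_from_offsets(
--     offsets: Any, start: int, end: int
-- ) -> tuple[int | None, int | None]:
--     """Trouve les bornes de caractères correspondant à la fenêtre [start, end)."""
--     char_start: int | None = None
--     for i in range(start, end):
--         s, e = int(offsets[i][0]), int(offsets[i][1])  # pyright: ignore
--         if e > s:
--             char_start = s
--             break
--
--     char_end: int | None = None
--     for j in range(end - 1, start - 1, -1):
--         s, e = int(offsets[j][0]), int(offsets[j][1])  # pyright: ignore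
--         if e > s:
--             char_end = e
--             break
--
--     return char_start, char_end
-- ===== SOURCE B (Python) =====
-- def _char_bounds_from_offsets(offsets, start, end):
--     """Single accumulating forward pass instead of two directional early-break scans."""
--     char_start = None
--     char_end = None
--     for i in range(start, end):
--         s, e = int(offsets[i][0]), int(offsets[i][1])
--         if e > s:
--             if char_start is None:
--                 char_start = s
--             char_end = e
--     return char_start, char_end
-- ===== Notes on version B (the rewrite author's own statement) =====
-- stated objective: simpler
-- what changed: Replaces A's two directional early-break scans (forward for the first non-empty offset, backward for the last) with one accumulating forward pass that records the first match's start and keeps overwriting the end with each match.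
import Mathlib
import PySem

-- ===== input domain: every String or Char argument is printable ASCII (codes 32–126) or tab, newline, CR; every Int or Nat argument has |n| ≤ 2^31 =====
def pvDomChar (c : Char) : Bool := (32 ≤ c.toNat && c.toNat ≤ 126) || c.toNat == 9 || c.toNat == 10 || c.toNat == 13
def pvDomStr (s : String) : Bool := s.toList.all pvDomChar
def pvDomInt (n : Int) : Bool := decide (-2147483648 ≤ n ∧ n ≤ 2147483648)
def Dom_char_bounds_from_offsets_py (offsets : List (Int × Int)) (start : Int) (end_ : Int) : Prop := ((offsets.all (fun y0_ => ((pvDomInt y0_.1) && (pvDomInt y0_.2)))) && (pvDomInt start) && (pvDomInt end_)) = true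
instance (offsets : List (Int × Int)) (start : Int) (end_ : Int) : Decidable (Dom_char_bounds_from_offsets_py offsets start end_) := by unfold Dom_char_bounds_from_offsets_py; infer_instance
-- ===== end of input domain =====

-- B replaces A's two directional early-break scans with one accumulating forward pass (objective: simpler).

-- ===== PORT A =====
-- first forward loop: scan indices, break with char_start = s on the first e > s
def pvAForward (offs : List (Int × Int)) : List Int → Option Int
  | [] => none
  | i :: rest =>
    match PySem.List.pyGet? offs i with
    | none => none   -- IndexError in Python; excluded by Pre_
    | some p => if p.2 > p.1 then some p.1 else pvAForward offs rest

-- second loop: scan the countdown range, break with char_end = e on the first e > s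
def pvABackward (offs : List (Int × Int)) : List Int → Option Int
  | [] => none
  | j :: rest =>
    match PySem.List.pyGet? offs j with
    | none => none   -- IndexError in Python; excluded by Pre_
    | some p => if p.2 > p.1 then some p.2 else pvABackward offs rest

def char_bounds_from_offsets_py (offsets : List (Int × Int)) (start : Int) (end_ : Int) : Option Int × Option Int :=
  (pvAForward offsets (PySem.List.pyRange start end_ 1),
   pvABackward offsets (PySem.List.pyRange (end_ - 1) (start - 1) (-1)))

-- ===== PORT B =====
-- one loop body: on a match, set char_start only if still None, always overwrite char_end
def pvBStep (offs : List (Int × Int)) (acc : Option Int × Option Int) (i : Int) : Option Int × Option Int :=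
  match PySem.List.pyGet? offs i with
  | none => acc    -- IndexError in Python; excluded by Pre_
  | some p =>
    if p.2 > p.1 then
      ((match acc.1 with | none => some p.1 | some x => some x), some p.2)
    else acc

def char_bounds_from_offsets_py_alt (offsets : List (Int × Int)) (start : Int) (end_ : Int) : Option Int × Option Int :=
  (PySem.List.pyRange start end_ 1).foldl (pvBStep offsets) (none, none)

-- ===== PRECONDITION & SPEC =====
-- Pre_ excludes exactly the inputs where A raises IndexError: a nonempty window whose
-- first or last index falls outside Python's (negative-wrapping) valid index range.
def Pre_char_bounds_from_offsets_py (offsets : List (Int × Int)) (start : Int) (end_ : Int) : Prop :=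
  start < end_ → (-(offsets.length : Int) ≤ start ∧ end_ ≤ (offsets.length : Int))
instance (offsets : List (Int × Int)) (start : Int) (end_ : Int) : Decidable (Pre_char_bounds_from_offsets_py offsets start end_) := by unfold Pre_char_bounds_from_offsets_py; infer_instance

def pvWitness_char_bounds_from_offsets_py : (List (Int × Int)) × Int × Int := ([(0, 2), (2, 2), (2, 5)], 0, 3)

def Spec_char_bounds_from_offsets_py (offsets : List (Int × Int)) (start : Int) (end_ : Int) (out : Option Int × Option Int) : Prop := out = char_bounds_from_offsets_py_alt offsets start end_
instance (offsets : List (Int × Int)) (start : Int) (end_ : Int) (out : Option Int × Option Int) : Decidable (Spec_char_bounds_from_offsets_py offsets start end_ out) := by unfold Spec_char_bounds_from_offsets_py; infer_instance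

-- ===== CLAIM (what is proved, stated in full; the proofs are below) =====
def Claim_equal_char_bounds_from_offsets_py : Prop := ∀ (offsets : List (Int × Int)) (start : Int) (end_ : Int), Dom_char_bounds_from_offsets_py offsets start end_ → Pre_char_bounds_from_offsets_py offsets start end_ → Spec_char_bounds_from_offsets_py offsets start end_ (char_bounds_from_offsets_py offsets start end_)

-- ===== LEMMAS AND PROOFS =====

-- "x or else y" on options, first-wins
def pvOr (x y : Option Int) : Option Int :=
  match x with | none => y | some v => some v

-- appending an all-valid index to a backward scan list consults it last
theorem pvABackward_append (offs : List (Int × Int)) (xs : List Int) (i : Int)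
    (h : ∀ j ∈ xs, (PySem.List.pyGet? offs j).isSome) :
    pvABackward offs (xs ++ [i]) = pvOr (pvABackward offs xs) (pvABackward offs [i]) := by
  induction xs with
  | nil => simp [pvABackward, pvOr]
  | cons a rest ih =>
    have ha := h a (by simp)
    have hrest : ∀ j ∈ rest, (PySem.List.pyGet? offs j).isSome := fun j hj => h j (by simp [hj])
    cases hg : PySem.List.pyGet? offs a with
    | none => simp [hg] at ha
    | some p =>
      by_cases hp : p.2 > p.1
      · simp [pvABackward, hg, hp, pvOr]
      · simp [pvABackward, hg, hp, ih hrest]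

-- the fold of B computes (first match's start, last match's end)
theorem pvB_fold (offs : List (Int × Int)) :
    ∀ (l : List Int) (cs ce : Option Int),
      (∀ i ∈ l, (PySem.List.pyGet? offs i).isSome) →
      l.foldl (pvBStep offs) (cs, ce) =
        (pvOr cs (pvAForward offs l), pvOr (pvABackward offs l.reverse) ce) := by
  intro l
  induction l with
  | nil => intro cs ce _; cases cs <;> simp [pvAForward, pvABackward, pvOr]
  | cons i rest ih =>
    intro cs ce h
    have hi := h i (by simp)
    have hrest : ∀ j ∈ rest, (PySem.List.pyGet? offs j).isSome := fun j hj => h j (by simp [hj])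
    have hrrev : ∀ j ∈ rest.reverse, (PySem.List.pyGet? offs j).isSome := by
      intro j hj; exact hrest j (List.mem_reverse.mp hj)
    cases hg : PySem.List.pyGet? offs i with
    | none => simp [hg] at hi
    | some p =>
      have hback := pvABackward_append offs rest.reverse i hrrev
      by_cases hp : p.2 > p.1
      · have step : pvBStep offs (cs, ce) i =
            ((match cs with | none => some p.1 | some x => some x), some p.2) := by
          simp [pvBStep, hg, hp]
        simp only [List.reverse_cons, List.foldl_cons, step, ih _ _ hrest, hback,
          pvAForward, pvABackward, hg, hp]
        cases cs <;> cases pvABackward offs rest.reverse <;> simp [pvOr]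
      · have step : pvBStep offs (cs, ce) i = (cs, ce) := by
          simp [pvBStep, hg, hp]
        simp only [List.reverse_cons, List.foldl_cons, step, ih _ _ hrest, hback,
          pvAForward, pvABackward, hg, hp]
        cases pvABackward offs rest.reverse <;> simp [pvOr]

theorem pvPre_all_some (offsets : List (Int × Int)) (start end_ : Int)
    (hpre : Pre_char_bounds_from_offsets_py offsets start end_) :
    ∀ i ∈ PySem.List.pyRange start end_ 1, (PySem.List.pyGet? offsets i).isSome := by
  intro i hi
  rw [PySem.List.mem_pyRange_one] at hi
  have hlt : start < end_ := lt_of_le_of_lt hi.1 hi.2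
  have hb := hpre hlt
  have : PySem.Raise.InRange offsets.length i := by
    unfold PySem.Raise.InRange
    rcases lt_or_ge i 0 with hneg | hnn
    · constructor
      · exact le_trans hb.1 hi.1
      · omega
    · constructor
      · omega
      · exact lt_of_lt_of_le hi.2 hb.2
  cases hg : PySem.List.pyGet? offsets i with
  | none =>
    rw [PySem.List.pyGet?_eq_none_iff] at hg
    exact absurd this hg
  | some _ => rfl

-- ===== VERDICT (by name: the statement is the Claim_ definition above) =====
theorem char_bounds_from_offsets_py_spec : Claim_equal_char_bounds_from_offsets_py := by
  intro offsets start end_ _ hpre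
  unfold Spec_char_bounds_from_offsets_py char_bounds_from_offsets_py char_bounds_from_offsets_py_alt
  have hall := pvPre_all_some offsets start end_ hpre
  rw [pvB_fold offsets _ none none hall]
  have hrange : PySem.List.pyRange (end_ - 1) (start - 1) (-1) =
      (PySem.List.pyRange start end_ 1).reverse := by
    have := PySem.List.pyRange_neg_one_eq_reverse (end_ - 1) (start - 1)
    simpa using this
  rw [hrange]
  cases pvABackward offsets (PySem.List.pyRange start end_ 1).reverse <;> simp [pvOr]
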